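-- pv_equiv track=rewrite | github.com/CharlesGe129/CodeChallenges | LetterChanges.py | LetterChanges
-- ===== SOURCE A (Python) =====
-- def LetterChanges(str):
--     rs = ''
--     package = 'abcdefghijklmnopqrstuvwxyz'
--     for i in range(len(str)):
--         index = package.find(str[i].lower())
--         flag = True if str[i].isupper() else False
--         if index >= 0:
--             index = index + 1 if index < 25 else 0
--             temp = package[index]
--         else:
--             temp = str[i]
--         if temp in 'aeiou' or flag:
--             temp = temp.upper()
--         rs += temp
--     return rs
-- ===== SOURCE B (Python) =====
-- def LetterChanges(str):
--     lowers = 'abcdefghijklmnopqrstuvwxyz'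
--     shifted = lowers[1:] + lowers[0]
--     table = {}
--     for c, t in zip(lowers, shifted):
--         table[ord(c)] = t.upper() if t in 'aeiou' else t
--         table[ord(c.upper())] = t.upper()
--     return str.translate(table)
-- ===== Notes on version B (the rewrite author's own statement) =====
-- stated objective: idiomatic
-- what changed: B precomputes a 52-entry translation table once (zip of the alphabet with its one-step rotation, encoding the vowel/originally-uppercase uppercasing rules) and maps the string through it in one str.translate pass, replacing A's per-character alphabet find/flag/branch loop (the C-level translate removes all per-character Python work).
import Mathlib
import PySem

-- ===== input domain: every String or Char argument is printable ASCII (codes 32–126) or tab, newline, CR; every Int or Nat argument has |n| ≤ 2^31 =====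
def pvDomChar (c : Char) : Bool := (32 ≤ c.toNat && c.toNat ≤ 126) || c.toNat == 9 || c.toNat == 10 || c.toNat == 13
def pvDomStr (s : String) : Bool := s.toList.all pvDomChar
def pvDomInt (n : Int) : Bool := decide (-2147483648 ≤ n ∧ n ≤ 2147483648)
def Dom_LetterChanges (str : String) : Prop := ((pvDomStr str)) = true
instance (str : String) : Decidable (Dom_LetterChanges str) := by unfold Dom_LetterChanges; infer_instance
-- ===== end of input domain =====

-- B replaces A's per-character alphabet scan with a precomputed translation table and one translate pass (idiomatic).

-- ===== PORT A =====
-- A's loop body for one character str[i] (the loop 'for i in range(len(str))' reads exactly str[i], so it is a fold over the characters).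
def pvStepA (c : Char) : Char :=
  let package : List Char := "abcdefghijklmnopqrstuvwxyz".toList
  let index : Int := PySem.Chars.find package [PySem.Chars.lowerChar c]
  let flag : Bool := PySem.Chars.isupper c
  let temp : Char :=
    if index ≥ 0 then
      let index : Int := if index < 25 then index + 1 else 0
      -- package[index]: index is always 0..25 here, so pyGet? is some; getD only supplies totality
      (PySem.List.pyGet? package index).getD c
    else c
  if PySem.Chars.isIn [temp] "aeiou".toList || flag then PySem.Chars.upperChar temp else temp

def LetterChanges (str : String) : String :=
  String.mk (str.toList.foldl (fun rs c => rs ++ [pvStepA c]) [])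

-- ===== PORT B =====
-- the translation table: for each lowercase letter c with rotated successor t,
-- ord(c) ↦ (t uppercased if vowel), ord(C) ↦ t uppercased
def pvTable : PySem.Dict Int Char :=
  let lowers : List Char := "abcdefghijklmnopqrstuvwxyz".toList
  let shifted : List Char := lowers.drop 1 ++ lowers.take 1
  (lowers.zip shifted).foldl
    (fun tb p =>
      let t := p.2
      let tb := tb.insert (p.1.toNat : Int)
        (if PySem.Chars.isIn [t] "aeiou".toList then PySem.Chars.upperChar t else t)
      tb.insert ((PySem.Chars.upperChar p.1).toNat : Int) (PySem.Chars.upperChar t))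
    PySem.Dict.empty

-- str.translate(table): characters absent from the table pass through unchanged
def LetterChanges_alt (str : String) : String :=
  String.mk (str.toList.map (fun c => (pvTable.get? (c.toNat : Int)).getD c))

-- ===== PRECONDITION & SPEC =====
def Spec_LetterChanges (str : String) (out : String) : Prop := out = LetterChanges_alt str
instance (str : String) (out : String) : Decidable (Spec_LetterChanges str out) := by unfold Spec_LetterChanges; infer_instance

-- ===== CLAIM (what is proved, stated in full; the proofs are below) =====
def Claim_equal_LetterChanges : Prop := ∀ (str : String), Dom_LetterChanges str → Spec_LetterChanges str (LetterChanges str)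

-- ===== LEMMAS AND PROOFS =====
set_option maxRecDepth 20000 in
lemma pvStep_eq_nat : ∀ n < 128, pvStepA (Char.ofNat n) = (pvTable.get? ((Char.ofNat n).toNat : Int)).getD (Char.ofNat n) := by
  decide

lemma pvStep_eq (c : Char) (h : pvDomChar c = true) :
    pvStepA c = (pvTable.get? (c.toNat : Int)).getD c := by
  have hlt : c.toNat < 128 := by
    unfold pvDomChar at h
    simp only [Bool.or_eq_true, Bool.and_eq_true, decide_eq_true_eq, beq_iff_eq, Nat.le_iff_lt_or_eq] at h
    omega
  rw [← Char.ofNat_toNat c]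
  exact pvStep_eq_nat c.toNat hlt

lemma pvFoldl_map (l : List Char) (acc : List Char) :
    l.foldl (fun rs c => rs ++ [pvStepA c]) acc = acc ++ l.map pvStepA := by
  induction l generalizing acc with
  | nil => simp
  | cons x xs ih => simp [List.foldl, ih]

-- ===== VERDICT (by name: the statement is the Claim_ definition above) =====
set_option maxRecDepth 20000 in
theorem LetterChanges_spec : Claim_equal_LetterChanges := by
  intro str hdom
  unfold Spec_LetterChanges LetterChanges LetterChanges_alt
  rw [pvFoldl_map]
  simp only [List.nil_append]
  congr 1
  apply List.map_congr_left
  intro c hc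
  apply pvStep_eq
  have := (List.all_eq_true.mp hdom) c hc
  exact this
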